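-- pv_equiv track=rewrite | github.com/dmitry-goydin/Misc | Maya.py | divisible_palindrome
-- ===== SOURCE A (Python) =====
-- def divisible_palindrome(max, divisor):
--     result = 0
--     num = max - 1
--     while num > 10:
--         if num % divisor == 0 and str(num) == str(num)[::-1]:
--             result = num
--             break
--         num -= 1
--     return result
-- ===== SOURCE B (Python) =====
-- def divisible_palindrome(max, divisor):
--     d = abs(divisor)
--     for k in range((max - 1) // d, 10 // d, -1):
--         n = k * d
--         s = str(n)
--         if list(s) == list(reversed(s)):
--             return n
--     return 0
-- ===== Notes on version B (the rewrite author's own statement) =====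
-- stated objective: faster
-- what changed: B precomputes the descending list of multiple-indices k with range((max-1)//|divisor|, 10//|divisor|, -1) and scans that list for the first k whose multiple k*|divisor| is a palindrome, instead of A's decrement-by-1 countdown that tests divisibility at every integer.
-- outside the precondition, e.g. on divisible_palindrome(0, 0): A returns 0, B raises ZeroDivisionError; on divisible_palindrome(11, 0): A returns 0, B raises ZeroDivisionError
import Mathlib
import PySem

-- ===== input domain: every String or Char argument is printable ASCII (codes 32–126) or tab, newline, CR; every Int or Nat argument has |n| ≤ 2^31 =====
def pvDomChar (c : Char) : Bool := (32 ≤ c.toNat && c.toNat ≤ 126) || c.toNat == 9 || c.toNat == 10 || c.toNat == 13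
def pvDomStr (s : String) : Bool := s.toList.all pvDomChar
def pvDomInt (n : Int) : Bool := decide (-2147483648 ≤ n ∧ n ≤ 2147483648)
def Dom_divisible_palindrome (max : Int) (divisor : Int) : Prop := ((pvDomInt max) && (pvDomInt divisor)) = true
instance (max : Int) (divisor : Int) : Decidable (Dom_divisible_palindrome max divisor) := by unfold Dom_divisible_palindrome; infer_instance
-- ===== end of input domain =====

-- B scans the precomputed descending list of multiples of |divisor| (via range) instead of A's decrement-by-1 countdown; asymptotically faster by a factor |divisor|.


-- ===== PORT A =====
-- while num > 10: if num % divisor == 0 and str(num) == str(num)[::-1]: result = num; break; num -= 1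
def pvALoop (divisor : Int) (num : Int) : Int :=
  if h : 10 < num then
    if (PySem.Int.mod num divisor == 0)
        && (PySem.Str.slice? (PySem.Int.toStr num) none none (-1) == some (PySem.Int.toStr num)) then
      num
    else pvALoop divisor (num - 1)
  else 0
termination_by (num - 10).toNat
decreasing_by omega

def divisible_palindrome (max : Int) (divisor : Int) : Int :=
  pvALoop divisor (max - 1)

-- ===== PORT B =====
-- list(s) == list(reversed(s))
def pvPalB (n : Int) : Bool :=
  (PySem.Int.toStr n).toList == (PySem.Int.toStr n).toList.reverse

-- the for-loop body of Source B: scan the list of k's, return k*d at the first palindromic multiple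
def pvBScan (d : Int) : List Int → Int
  | [] => 0
  | k :: ks => if pvPalB (k * d) then k * d else pvBScan d ks

def divisible_palindrome_alt (max : Int) (divisor : Int) : Int :=
  let d := |divisor|
  pvBScan d (PySem.List.pyRange (PySem.Int.floordiv (max - 1) d) (PySem.Int.floordiv 10 d) (-1))

-- ===== PRECONDITION & SPEC =====
-- Pre_ excludes divisor == 0: there A raises ZeroDivisionError whenever max > 11, and for max <= 11 it returns 0 only because its loop body never runs, while B divides by abs(divisor) up front and raises.
def Pre_divisible_palindrome (max : Int) (divisor : Int) : Prop := divisor ≠ 0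
instance (max : Int) (divisor : Int) : Decidable (Pre_divisible_palindrome max divisor) := by unfold Pre_divisible_palindrome; infer_instance
def pvWitness_divisible_palindrome : Int × Int := (100, 3)

def Spec_divisible_palindrome (max : Int) (divisor : Int) (out : Int) : Prop := out = divisible_palindrome_alt max divisor
instance (max : Int) (divisor : Int) (out : Int) : Decidable (Spec_divisible_palindrome max divisor out) := by unfold Spec_divisible_palindrome; infer_instance

-- ===== CLAIM (what is proved, stated in full; the proofs are below) =====
def Claim_equal_divisible_palindrome : Prop := ∀ (max : Int) (divisor : Int), Dom_divisible_palindrome max divisor → Pre_divisible_palindrome max divisor → Spec_divisible_palindrome max divisor (divisible_palindrome max divisor)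

-- ===== LEMMAS AND PROOFS =====

-- A's palindrome test (s == s[::-1]) and B's (list(s) == list(reversed(s))) agree
lemma pv_pal_eq (n : Int) :
    ((PySem.Str.slice? (PySem.Int.toStr n) none none (-1) == some (PySem.Int.toStr n)))
      = pvPalB n := by
  rw [PySem.Str.slice?_none_none_neg_one, pvPalB]
  simp [String.ext_iff, eq_comm]

lemma pv_main (divisor : Int) (hd : divisor ≠ 0) :
    ∀ (n : Nat) (num : Int), (num - 10).toNat ≤ n →
      pvALoop divisor num
        = pvBScan |divisor|
            (PySem.List.pyRange (PySem.Int.floordiv num |divisor|) (PySem.Int.floordiv 10 |divisor|) (-1)) := by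
  have hd0 : 0 < |divisor| := abs_pos.mpr hd
  -- the lower bound of the range: k*|divisor| > 10  ↔  10 // |divisor| < k
  have hb := (PySem.Int.floordiv_eq_iff_of_pos hd0
      (a := (10 : Int)) (q := PySem.Int.floordiv 10 |divisor|)).mp rfl
  have hbase : ∀ num : Int, num ≤ 10 →
      pvALoop divisor num
        = pvBScan |divisor|
            (PySem.List.pyRange (PySem.Int.floordiv num |divisor|) (PySem.Int.floordiv 10 |divisor|) (-1)) := by
    intro num h10
    have hq := (PySem.Int.floordiv_eq_iff_of_pos hd0
        (a := num) (q := PySem.Int.floordiv num |divisor|)).mp rfl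
    have hle : PySem.Int.floordiv num |divisor| ≤ PySem.Int.floordiv 10 |divisor| := by
      by_contra hgt
      push_neg at hgt
      have h1 : PySem.Int.floordiv 10 |divisor| + 1 ≤ PySem.Int.floordiv num |divisor| := by omega
      have h2 : (PySem.Int.floordiv 10 |divisor| + 1) * |divisor|
          ≤ PySem.Int.floordiv num |divisor| * |divisor| :=
        mul_le_mul_of_nonneg_right h1 (le_of_lt hd0)
      omega
    rw [PySem.List.pyRange_neg_one_eq_nil hle, pvALoop, dif_neg (by omega)]
    rfl
  intro n
  induction n with
  | zero =>
    intro num hle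
    exact hbase num (by omega)
  | succ n ih =>
    intro num hle
    by_cases h10 : 10 < num
    · have hq := (PySem.Int.floordiv_eq_iff_of_pos hd0
        (a := num) (q := PySem.Int.floordiv num |divisor|)).mp rfl
      by_cases hdvd : divisor ∣ num
      · -- num is a multiple of the divisor: both sides inspect exactly num
        have hdvd' : |divisor| ∣ num := (abs_dvd _ _).mpr hdvd
        obtain ⟨k, hk⟩ := hdvd'
        have hqk : PySem.Int.floordiv num |divisor| = k := by
          rw [PySem.Int.floordiv_eq_iff_of_pos hd0]
          have h1 : k * |divisor| = |divisor| * k := by ring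
          have h2 : (k + 1) * |divisor| = |divisor| * k + |divisor| := by ring
          omega
        have hm : PySem.Int.floordiv num |divisor| * |divisor| = num := by
          rw [hqk, hk]; ring
        have hgt : PySem.Int.floordiv 10 |divisor| < PySem.Int.floordiv num |divisor| := by
          by_contra hle'
          push_neg at hle'
          have h2 : PySem.Int.floordiv num |divisor| * |divisor|
              ≤ PySem.Int.floordiv 10 |divisor| * |divisor| :=
            mul_le_mul_of_nonneg_right hle' (le_of_lt hd0)
          omega
        rw [PySem.List.pyRange_neg_one_cons hgt, pvALoop, dif_pos h10]
        have hmod : PySem.Int.mod num divisor = 0 :=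
          (PySem.Int.mod_eq_zero_iff_dvd num divisor).mpr hdvd
        rw [pvBScan]
        simp only [hmod, beq_self_eq_true, Bool.true_and, pv_pal_eq, hm]
        by_cases hpal : pvPalB num = true
        · simp [hpal]
        · simp only [Bool.not_eq_true] at hpal
          simp only [hpal, Bool.false_eq_true, if_false]
          have hq' : PySem.Int.floordiv (num - 1) |divisor| = PySem.Int.floordiv num |divisor| - 1 := by
            rw [PySem.Int.floordiv_eq_iff_of_pos hd0]
            have h1 : (PySem.Int.floordiv num |divisor| - 1) * |divisor|
                = PySem.Int.floordiv num |divisor| * |divisor| - |divisor| := by ring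
            have h2 : (PySem.Int.floordiv num |divisor| - 1 + 1) * |divisor|
                = PySem.Int.floordiv num |divisor| * |divisor| := by ring
            omega
          have hrec := ih (num - 1) (by omega)
          rw [hrec, hq']
      · -- not a multiple: only A steps; the range is unchanged
        have hmod : PySem.Int.mod num divisor ≠ 0 := fun h =>
          hdvd ((PySem.Int.mod_eq_zero_iff_dvd num divisor).mp h)
        rw [pvALoop, dif_pos h10]
        have hb' : (PySem.Int.mod num divisor == 0) = false := beq_eq_false_iff_ne.mpr hmod
        simp only [hb', Bool.false_and, Bool.false_eq_true, if_false]
        have hne : PySem.Int.floordiv num |divisor| * |divisor| ≠ num := by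
          intro h
          exact hdvd ((abs_dvd _ _).mp ⟨PySem.Int.floordiv num |divisor|, by rw [mul_comm]; exact h.symm⟩)
        have hq' : PySem.Int.floordiv (num - 1) |divisor| = PySem.Int.floordiv num |divisor| := by
          rw [PySem.Int.floordiv_eq_iff_of_pos hd0]
          omega
        rw [ih (num - 1) (by omega), hq']
    · exact hbase num (by omega)

-- ===== VERDICT (by name: the statement is the Claim_ definition above) =====
theorem divisible_palindrome_spec : Claim_equal_divisible_palindrome := by
  intro max divisor _ hpre
  unfold Spec_divisible_palindrome divisible_palindrome divisible_palindrome_alt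
  exact pv_main divisor hpre ((max - 1 - 10).toNat) (max - 1) le_rfl
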